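-- pv_equiv track=rewrite | github.com/Mnichuu/Python | 5/5.3/polys.py | sub_poly
-- ===== SOURCE A (Python) =====
-- def sub_poly(poly1, poly2):
--     result = []
--     len1, len2 = len(poly1), len(poly2)
--     max_len = max(len1, len2)
--
--     for i in range(max_len):
--         term1 = poly1[i] if i < len1 else 0
--         term2 = poly2[i] if i < len2 else 0
--         result.append(term1 - term2)
--
--     return result
-- ===== SOURCE B (Python) =====
-- def sub_poly(poly1, poly2):
--     n1, n2 = len(poly1), len(poly2)
--     result = [a - b for a, b in zip(poly1, poly2)]
--     if n1 > n2:
--         result += poly1[n2:]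
--     elif n2 > n1:
--         result += [0 - x for x in poly2[n1:]]
--     return result
-- ===== Notes on version B (the rewrite author's own statement) =====
-- stated objective: idiomatic
-- what changed: Replaces the single index-guarded loop to max(len1,len2) with a zip comprehension over the common prefix followed by appending the longer list's tail slice (negated for poly2).
import Mathlib
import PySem

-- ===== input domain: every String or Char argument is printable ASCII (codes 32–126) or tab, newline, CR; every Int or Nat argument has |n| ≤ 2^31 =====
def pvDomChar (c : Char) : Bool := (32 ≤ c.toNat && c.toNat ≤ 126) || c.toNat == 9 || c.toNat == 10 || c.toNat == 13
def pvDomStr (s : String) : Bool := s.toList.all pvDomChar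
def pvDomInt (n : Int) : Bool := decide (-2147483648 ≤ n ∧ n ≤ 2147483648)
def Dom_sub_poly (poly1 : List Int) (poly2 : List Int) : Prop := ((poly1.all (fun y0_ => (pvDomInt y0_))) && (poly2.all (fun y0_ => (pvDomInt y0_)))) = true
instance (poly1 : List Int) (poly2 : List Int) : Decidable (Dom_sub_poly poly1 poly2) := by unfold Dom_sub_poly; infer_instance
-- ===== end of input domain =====

-- B replaces A's single index-guarded loop to max(len1,len2) by a zip over the common
-- prefix plus an appended tail slice of the longer list (negated for poly2); same cost, more idiomatic.


-- ===== PORT A =====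
def sub_poly (poly1 : List Int) (poly2 : List Int) : List Int :=
  let len1 : Int := poly1.length
  let len2 : Int := poly2.length
  let maxLen : Int := max len1 len2
  (PySem.List.pyRange 0 maxLen 1).foldl (fun result i =>
    let term1 : Int := if i < len1 then PySem.List.pyGetD poly1 i 0 else 0
    let term2 : Int := if i < len2 then PySem.List.pyGetD poly2 i 0 else 0
    result ++ [term1 - term2]) []

-- ===== PORT B =====
def sub_poly_alt (poly1 : List Int) (poly2 : List Int) : List Int :=
  let n1 : Int := poly1.length
  let n2 : Int := poly2.length
  let result := (poly1.zip poly2).map (fun ab => ab.1 - ab.2)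
  if n1 > n2 then result ++ PySem.List.slice poly1 (some n2) none
  else if n2 > n1 then result ++ (PySem.List.slice poly2 (some n1) none).map (fun x => 0 - x)
  else result

-- ===== PRECONDITION & SPEC =====
def Spec_sub_poly (poly1 : List Int) (poly2 : List Int) (out : List Int) : Prop := out = sub_poly_alt poly1 poly2
instance (poly1 : List Int) (poly2 : List Int) (out : List Int) : Decidable (Spec_sub_poly poly1 poly2 out) := by unfold Spec_sub_poly; infer_instance

-- ===== CLAIM (what is proved, stated in full; the proofs are below) =====
def Claim_equal_sub_poly : Prop := ∀ (poly1 : List Int) (poly2 : List Int), Dom_sub_poly poly1 poly2 → Spec_sub_poly poly1 poly2 (sub_poly poly1 poly2)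

-- ===== LEMMAS AND PROOFS =====

-- the common canonical form: coefficient i is getD p1 i 0 - getD p2 i 0 for i < max of the lengths
def canonSub (p1 p2 : List Int) : List Int :=
  (List.range (max p1.length p2.length)).map (fun i => p1.getD i 0 - p2.getD i 0)

lemma range_map_getD {α β : Type} [Inhabited α] (f : α → β) (p : List α) (d : α) :
    (List.range p.length).map (fun i => f (p.getD i d)) = p.map f := by
  induction p with
  | nil => simp
  | cons a as ih =>
      simp [List.range_succ_eq_map, List.map_map, Function.comp_def]
      exact ih

lemma alt_cons (a b : Int) (p1 p2 : List Int) :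
    sub_poly_alt (a :: p1) (b :: p2) = (a - b) :: sub_poly_alt p1 p2 := by
  simp only [sub_poly_alt, List.length_cons, List.zip_cons_cons, List.map_cons]
  have h1 : ((p1.length : Int) + 1 > (p2.length : Int) + 1) ↔ ((p1.length : Int) > (p2.length : Int)) := by omega
  have hs1 : PySem.List.slice (a :: p1) (some ((p2.length : Int) + 1)) none
      = PySem.List.slice p1 (some (p2.length : Int)) none := by
    have e : ((p2.length : Int) + 1) = ((p2.length + 1 : ℕ) : Int) := by push_cast; ring
    rw [e, PySem.List.slice_from_natCast, PySem.List.slice_from_natCast]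
    simp [List.drop_succ_cons]
  have hs2 : PySem.List.slice (b :: p2) (some ((p1.length : Int) + 1)) none
      = PySem.List.slice p2 (some (p1.length : Int)) none := by
    have e : ((p1.length : Int) + 1) = ((p1.length + 1 : ℕ) : Int) := by push_cast; ring
    rw [e, PySem.List.slice_from_natCast, PySem.List.slice_from_natCast]
    simp [List.drop_succ_cons]
  push_cast
  rw [hs1, hs2]
  split_ifs with hgt hlt hgt' hlt' <;> simp_all

lemma canon_eq_alt (p1 p2 : List Int) : canonSub p1 p2 = sub_poly_alt p1 p2 := by
  induction p1 generalizing p2 with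
  | nil =>
      cases p2 with
      | nil => simp [canonSub, sub_poly_alt]
      | cons b bs =>
          simp only [canonSub, List.length_nil, Nat.max_eq_right (Nat.zero_le _)]
          have : (List.range (b :: bs).length).map
              (fun i => (List.getD ([] : List Int) i 0) - (b :: bs).getD i 0)
              = (b :: bs).map (fun x => 0 - x) := by
            have := range_map_getD (fun x => 0 - x) (b :: bs) (0 : Int)
            simpa using this
          rw [this]
          simp only [sub_poly_alt, List.length_nil, Nat.cast_zero, List.zip_nil_left,
            List.map_nil, List.nil_append]
          rw [if_neg (by omega : ¬((0:Int) > ((b :: bs).length : Int))),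
              if_pos (by push_cast [List.length_cons]; omega : ((b :: bs).length : Int) > 0),
              show ((0:Int)) = ((0:ℕ):Int) by simp, PySem.List.slice_from_natCast]
          simp
  | cons a as ih =>
      cases p2 with
      | nil =>
          simp only [canonSub, List.length_nil, Nat.max_eq_left (Nat.zero_le _)]
          have : (List.range (a :: as).length).map
              (fun i => (a :: as).getD i 0 - (List.getD ([] : List Int) i 0))
              = (a :: as).map (fun x => x - 0) := by
            have := range_map_getD (fun x => x - 0) (a :: as) (0 : Int)
            simpa using this
          rw [this]
          simp only [sub_poly_alt, List.length_nil, Nat.cast_zero, List.zip_nil_right,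
            List.map_nil, List.nil_append]
          rw [if_pos (by push_cast [List.length_cons]; omega : ((a :: as).length : Int) > (0:Int)),
              show ((0:Int)) = ((0:ℕ):Int) by simp, PySem.List.slice_from_natCast]
          simp
      | cons b bs =>
          rw [alt_cons, ← ih]
          simp [canonSub, List.range_succ_eq_map, List.map_map, Function.comp_def]

lemma a_eq_canon (p1 p2 : List Int) : sub_poly p1 p2 = canonSub p1 p2 := by
  simp only [sub_poly, PySem.List.foldl_append_singleton_eq_map, List.nil_append]
  have hm : (max (p1.length : Int) (p2.length : Int)) = ((max p1.length p2.length : ℕ) : Int) := by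
    push_cast; omega
  rw [hm, PySem.List.pyRange_one]
  simp only [Int.sub_zero, Int.toNat_natCast, List.map_map, canonSub]
  apply List.map_congr_left
  intro i hi
  simp only [Function.comp_def, Int.zero_add]
  have h1 : ((i : Int) < (p1.length : Int)) ↔ i < p1.length := by omega
  have h2 : ((i : Int) < (p2.length : Int)) ↔ i < p2.length := by omega
  split_ifs with c1 c2 c2 <;>
    simp_all [PySem.List.pyGetD_natCast, le_of_not_gt]

-- ===== VERDICT (by name: the statement is the Claim_ definition above) =====
theorem sub_poly_spec : Claim_equal_sub_poly := by
  intro p1 p2 _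
  show sub_poly p1 p2 = sub_poly_alt p1 p2
  rw [a_eq_canon, canon_eq_alt]
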